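-- pv_equiv track=rewrite | github.com/irupawala/Ibrahim-List | Ibrahim Personal/Ready/ADMSU/AA&C/PAs/Week 4/circuit_design/Testing codes/Unit_testing.py | explore_post_order
-- ===== SOURCE A (Python) =====
-- def explore_post_order(adj_list, visited, post_order, n, clock):
--     visited[n] = True
--     clock  = clock + 1 # to mark previsit
--     for x in adj_list[n]:
--         if visited[x] == False:
--             clock, post_order = explore_post_order(adj_list, visited, post_order, x, clock)
--     clock  = clock + 1
--     post_order[n] = clock
--     return clock, post_order
-- ===== SOURCE B (Python) =====
-- def explore_post_order(adj_list, visited, post_order, n, clock):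
--     # Iterative DFS with an explicit stack of (node, next-neighbour-index) frames
--     # (same in-place mutation of visited/post_order as the recursive original).
--     visited[n] = True
--     clock = clock + 1
--     stack = [(n, 0)]
--     while stack:
--         node, i = stack.pop()
--         neighbours = adj_list[node]
--         child = None
--         while i < len(neighbours):
--             x = neighbours[i]
--             i = i + 1
--             if visited[x] == False:
--                 child = x
--                 break
--         if child is None:
--             clock = clock + 1
--             post_order[node] = clock
--         else:
--             stack.append((node, i))
--             visited[child] = True
--             clock = clock + 1
--             stack.append((child, 0))
--     return clock, post_order
-- ===== Notes on version B (the rewrite author's own statement) =====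
-- stated objective: alternative
-- what changed: The recursive DFS (recursion on each unvisited neighbour) is replaced by an iterative DFS driven by an explicit stack of (node, next-neighbour-index) frames; previsit/postvisit clock updates and in-place mutation of visited/post_order are preserved.
import Mathlib
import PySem

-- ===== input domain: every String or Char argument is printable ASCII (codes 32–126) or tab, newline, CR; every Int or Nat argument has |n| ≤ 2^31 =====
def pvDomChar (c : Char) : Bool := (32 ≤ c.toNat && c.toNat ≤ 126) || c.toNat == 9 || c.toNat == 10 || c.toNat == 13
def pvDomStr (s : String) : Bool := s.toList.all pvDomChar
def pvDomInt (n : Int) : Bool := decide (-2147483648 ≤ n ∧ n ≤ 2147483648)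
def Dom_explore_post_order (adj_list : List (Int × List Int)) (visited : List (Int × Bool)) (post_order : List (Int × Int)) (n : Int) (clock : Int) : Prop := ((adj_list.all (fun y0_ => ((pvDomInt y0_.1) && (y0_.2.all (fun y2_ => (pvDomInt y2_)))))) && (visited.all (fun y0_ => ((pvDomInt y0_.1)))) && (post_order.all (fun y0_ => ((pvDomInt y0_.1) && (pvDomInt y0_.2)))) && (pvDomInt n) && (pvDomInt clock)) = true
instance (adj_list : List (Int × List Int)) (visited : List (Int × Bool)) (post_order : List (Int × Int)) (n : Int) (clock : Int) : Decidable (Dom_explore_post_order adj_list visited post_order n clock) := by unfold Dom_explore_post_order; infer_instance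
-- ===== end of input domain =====

-- B replaces A's recursive DFS by an explicit-stack iterative DFS (same asymptotic cost, different
-- decomposition).  In Python both A and B mutate `visited` and `post_order` in place identically;
-- the theorems below are about the returned (clock, post_order) pair.
-- Both ports carry an explicit fuel argument purely as a totality device (Lean requires a terminating
-- definition); the branches taken when fuel is exhausted are never reached at the top level on inputs
-- satisfying Pre_, where at most `visited.length` recursive calls / child pushes can occur.

-- ===== PORT A =====
-- A's recursion with state (fuel, visited, post_order, clock).  The `for x in adj_list[n]` loop is the
-- structural recursion on the neighbour list; a recursive call `explore_post_order(..., x, clock)` is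
-- the fuel-consuming branch: previsit (visited[x] = True, clock + 1), the child's own loop over
-- adj_list[x], then the child's postvisit.  `min res.1 f'` is the threaded remaining fuel (it always
-- equals res.1 — pvStepA_fuel_le below — and is written with `min` only so termination is syntactic).
-- Dict lookups adj_list[m] / visited[x] are exact where the key is present, which Pre_ guarantees.
def pvStepA (adj : PySem.Dict Int (List Int)) : Nat → List Int → PySem.Dict Int Bool → PySem.Dict Int Int → Int → Nat × PySem.Dict Int Bool × PySem.Dict Int Int × Int
  | f, [], v, p, c => (f, v, p, c)
  | f, x :: r, v, p, c =>
    if v.getD x false = false then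
      match f with
      | 0 => pvStepA adj 0 r v p c
      | f' + 1 =>
        let res := pvStepA adj f' (adj.getD x []) (v.insert x true) p (c + 1)
        pvStepA adj (min res.1 f') r res.2.1 (res.2.2.1.insert x (res.2.2.2 + 1)) (res.2.2.2 + 1)
    else pvStepA adj f r v p c
termination_by f xs _ _ _ => (f, xs.length)
decreasing_by
  all_goals first
    | exact Prod.Lex.left _ _ (Nat.lt_succ_of_le (Nat.min_le_right _ _))
    | exact Prod.Lex.left _ _ (by omega)
    | exact Prod.Lex.right _ (by simp only [List.length_cons]; omega)

def explore_post_order (adj_list : List (Int × List Int)) (visited : List (Int × Bool)) (post_order : List (Int × Int)) (n : Int) (clock : Int) : Int × (List (Int × Int)) :=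
  let adj := PySem.Dict.mk adj_list
  let v := (PySem.Dict.mk visited).insert n true     -- visited[n] = True
  let r := pvStepA adj (visited.length + 1) (adj.getD n []) v (PySem.Dict.mk post_order) (clock + 1)
  (r.2.2.2 + 1, (r.2.2.1.insert n (r.2.2.2 + 1)).items)   -- clock += 1; post_order[n] = clock

-- ===== PORT B =====
-- B's inner `while i < len(neighbours)` loop: the first unvisited neighbour together with the
-- remaining suffix (the suffix after x is Python's saved index i into the neighbour list).
def pvScan (v : PySem.Dict Int Bool) : List Int → Option (Int × List Int)
  | [] => none
  | x :: r => if v.getD x false = false then some (x, r) else pvScan v r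

-- B's outer `while stack` loop: pop a frame, scan its remaining neighbours; no unvisited neighbour →
-- postvisit the node and drop the frame; otherwise push the parent back (suffix past the child) and
-- push the child's fresh frame after its previsit.  Fuel is consumed only when a child is pushed;
-- the fuel-0 row is the unreachable exhaustion branch.
def pvRunB (adj : PySem.Dict Int (List Int)) : Nat → List (Int × List Int) → PySem.Dict Int Bool → PySem.Dict Int Int → Int → PySem.Dict Int Bool × PySem.Dict Int Int × Int
  | _, [], v, p, c => (v, p, c)
  | 0, (node, _) :: stk, v, p, c => pvRunB adj 0 stk v (p.insert node (c + 1)) (c + 1)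
  | f' + 1, (node, rest) :: stk, v, p, c =>
    match pvScan v rest with
    | none => pvRunB adj (f' + 1) stk v (p.insert node (c + 1)) (c + 1)
    | some (x, rest') => pvRunB adj f' ((x, adj.getD x []) :: (node, rest') :: stk) (v.insert x true) p (c + 1)
termination_by f stk _ _ _ => (f, stk.length)
decreasing_by
  all_goals first
    | exact Prod.Lex.left _ _ (by omega)
    | exact Prod.Lex.right _ (by simp only [List.length_cons]; omega)

def explore_post_order_alt (adj_list : List (Int × List Int)) (visited : List (Int × Bool)) (post_order : List (Int × Int)) (n : Int) (clock : Int) : Int × (List (Int × Int)) :=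
  let adj := PySem.Dict.mk adj_list
  let v := (PySem.Dict.mk visited).insert n true     -- visited[n] = True
  let r := pvRunB adj (visited.length + 1) [(n, adj.getD n [])] v (PySem.Dict.mk post_order) (clock + 1)
  (r.2.2, r.2.1.items)

-- ===== PRECONDITION & SPEC =====
-- pvClose/pvReach: the nodes reachable from n along neighbours whose initial visited entry is
-- `false` (with visited[n] already set True, as A does first); A's recursion enters exactly these
-- nodes.  `visited.length` expansion rounds reach the fixpoint, since every round short of it adds
-- at least one of the ≤ visited.length keys mapped to false.
def pvClose (adj_list : List (Int × List Int)) (v' : PySem.Dict Int Bool) : Nat → List Int → List Int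
  | 0, S => S
  | k + 1, S =>
    pvClose adj_list v' k
      ((S ++ (S.flatMap (fun m => (PySem.Dict.mk adj_list).getD m [])).filter
          (fun x => v'.get? x == some false)).dedup)

def pvReach (adj_list : List (Int × List Int)) (visited : List (Int × Bool)) (n : Int) : List Int :=
  pvClose adj_list ((PySem.Dict.mk visited).insert n true) visited.length [n]

-- Pre_ excludes exactly the inputs on which the Python A raises KeyError: A looks up adj_list[m] for
-- precisely the nodes m it recurses into (pvReach), and examines visited[x] for precisely the
-- neighbours x of those nodes (x = n never raises, since visited[n] = True is assigned first).
def Pre_explore_post_order (adj_list : List (Int × List Int)) (visited : List (Int × Bool)) (post_order : List (Int × Int)) (n : Int) (clock : Int) : Prop :=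
  ∀ m ∈ pvReach adj_list visited n,
    m ∈ adj_list.map (·.1) ∧
    ∀ x ∈ (PySem.Dict.mk adj_list).getD m [], (x ∈ visited.map (·.1) ∨ x = n)
instance (adj_list : List (Int × List Int)) (visited : List (Int × Bool)) (post_order : List (Int × Int)) (n : Int) (clock : Int) : Decidable (Pre_explore_post_order adj_list visited post_order n clock) := by unfold Pre_explore_post_order; infer_instance

def pvWitness_explore_post_order : (List (Int × List Int)) × (List (Int × Bool)) × (List (Int × Int)) × Int × Int :=
  ([(0, [1, 2]), (1, [2]), (2, [])], [(0, false), (1, false), (2, false)], [], 0, 0)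

def Spec_explore_post_order (adj_list : List (Int × List Int)) (visited : List (Int × Bool)) (post_order : List (Int × Int)) (n : Int) (clock : Int) (out : Int × (List (Int × Int))) : Prop := out = explore_post_order_alt adj_list visited post_order n clock
instance (adj_list : List (Int × List Int)) (visited : List (Int × Bool)) (post_order : List (Int × Int)) (n : Int) (clock : Int) (out : Int × (List (Int × Int))) : Decidable (Spec_explore_post_order adj_list visited post_order n clock out) := by unfold Spec_explore_post_order; infer_instance

-- ===== CLAIM (what is proved, stated in full; the proofs are below) =====
def Claim_equal_explore_post_order : Prop := ∀ (adj_list : List (Int × List Int)) (visited : List (Int × Bool)) (post_order : List (Int × Int)) (n : Int) (clock : Int), Dom_explore_post_order adj_list visited post_order n clock → Pre_explore_post_order adj_list visited post_order n clock → Spec_explore_post_order adj_list visited post_order n clock (explore_post_order adj_list visited post_order n clock)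

-- ===== LEMMAS AND PROOFS =====

-- With no fuel, A's neighbour loop is the identity on (visited, post_order, clock).
theorem pvStepA_zero (adj : PySem.Dict Int (List Int)) : ∀ (xs : List Int) (v : PySem.Dict Int Bool) (p : PySem.Dict Int Int) (c : Int), pvStepA adj 0 xs v p c = (0, v, p, c) := by
  intro xs
  induction xs with
  | nil => intro v p c; simp [pvStepA]
  | cons x r ih =>
    intro v p c
    rw [pvStepA]
    by_cases hx : v.getD x false = false <;> simp [hx, ih]

-- A's threaded fuel never grows.
theorem pvStepA_fuel_le (adj : PySem.Dict Int (List Int)) : ∀ (f : Nat) (xs : List Int) (v : PySem.Dict Int Bool) (p : PySem.Dict Int Int) (c : Int), (pvStepA adj f xs v p c).1 ≤ f := by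
  intro f
  induction f using Nat.strong_induction_on with
  | _ f IHf =>
    intro xs
    induction xs with
    | nil => intro v p c; simp [pvStepA]
    | cons x r IHr =>
      intro v p c
      cases f with
      | zero => simp [pvStepA_zero]
      | succ f' =>
        by_cases hx : v.getD x false = false
        · rw [pvStepA]
          simp only [hx, if_true]
          have h1 : min (pvStepA adj f' (adj.getD x []) (v.insert x true) p (c+1)).1 f' ≤ f' := Nat.min_le_right _ _
          have h2 := IHf (min (pvStepA adj f' (adj.getD x []) (v.insert x true) p (c+1)).1 f') (by omega) r
          exact le_trans (h2 _ _ _) (by omega)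
        · rw [pvStepA]
          simp only [hx]
          exact IHr v p c

-- Key bridge: running B's machine on a frame ⟨n, rest⟩ on top of `stk` first performs exactly A's
-- neighbour loop over `rest` (same state, same fuel accounting), then n's postvisit, and only then
-- continues with the rest of the stack — for EVERY fuel value, so no sufficient-fuel argument is needed.
theorem pvRunB_frame (adj : PySem.Dict Int (List Int)) : ∀ (f : Nat) (rest : List Int) (n : Int) (stk : List (Int × List Int)) (v : PySem.Dict Int Bool) (p : PySem.Dict Int Int) (c : Int),
    pvRunB adj f ((n, rest) :: stk) v p c =
      (let r := pvStepA adj f rest v p c;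
       pvRunB adj r.1 stk r.2.1 (r.2.2.1.insert n (r.2.2.2 + 1)) (r.2.2.2 + 1)) := by
  intro f
  induction f using Nat.strong_induction_on with
  | _ f IHf =>
    intro rest
    induction rest with
    | nil =>
      intro n stk v p c
      cases f <;> simp [pvRunB, pvStepA, pvScan]
    | cons x r IHr =>
      intro n stk v p c
      cases f with
      | zero =>
        rw [pvRunB]
        simp [pvStepA_zero]
      | succ f' =>
        rw [pvRunB]
        by_cases hx : v.getD x false = false
        · have hscan : pvScan v (x :: r) = some (x, r) := by simp [pvScan, hx]
          rw [hscan]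
          simp only []
          rw [IHf f' (by omega) (adj.getD x []) x ((n, r) :: stk) (v.insert x true) p (c + 1)]
          simp only []
          set res := pvStepA adj f' (adj.getD x []) (v.insert x true) p (c + 1) with hres
          have hle : res.1 ≤ f' := by rw [hres]; exact pvStepA_fuel_le adj f' _ _ _ _
          rw [IHf res.1 (by omega) r n stk res.2.1 (res.2.2.1.insert x (res.2.2.2 + 1)) (res.2.2.2 + 1)]
          have hmin : min res.1 f' = res.1 := Nat.min_eq_left hle
          rw [pvStepA]
          simp only [hx, if_true, ← hres, hmin]
        · have hscan : pvScan v (x :: r) = pvScan v r := by simp [pvScan, hx]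
          rw [hscan]
          have hIH := IHr n stk v p c
          rw [pvRunB] at hIH
          rw [hIH]
          have hstep : pvStepA adj (f' + 1) (x :: r) v p c = pvStepA adj (f' + 1) r v p c := by
            rw [pvStepA]; simp [hx]
          rw [hstep]

-- ===== VERDICT (by name: the statement is the Claim_ definition above) =====
theorem explore_post_order_spec : Claim_equal_explore_post_order := by
  intro adj_list visited post_order n clock _ _
  unfold Spec_explore_post_order explore_post_order explore_post_order_alt
  simp only [pvRunB_frame]
  simp [pvRunB]
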